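-- pv_equiv track=rewrite | github.com/artemvovk/practice | python/cracking/hard.py | prime_multiples
-- ===== SOURCE A (Python) =====
-- def prime_multiples(offset):
--     primes = [3, 5, 7]
--     multiple = [1]
--     for idx in range(0, offset, 3):
--         for prime in primes:
--             base = multiple[idx]
--             multiple.append(base*prime)
--     return multiple[offset-1]
-- ===== SOURCE B (Python) =====
-- def prime_multiples(offset):
--     # Closed form: A's list is [1] followed by blocks [3*7**k, 5*7**k, 7*7**k].
--     if offset <= 1:
--         return 1
--     k, j = divmod(offset - 2, 3)
--     return 7 ** k * [3, 5, 7][j]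
-- ===== Notes on version B (the rewrite author's own statement) =====
-- stated objective: simpler
-- what changed: Replaces the loop that materializes the whole list of prime multiples with a closed-form divmod: the entry at offset-1 is 7**((offset-2)//3) * [3,5,7][(offset-2)%3], with 1 for offset <= 1.
import Mathlib
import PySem

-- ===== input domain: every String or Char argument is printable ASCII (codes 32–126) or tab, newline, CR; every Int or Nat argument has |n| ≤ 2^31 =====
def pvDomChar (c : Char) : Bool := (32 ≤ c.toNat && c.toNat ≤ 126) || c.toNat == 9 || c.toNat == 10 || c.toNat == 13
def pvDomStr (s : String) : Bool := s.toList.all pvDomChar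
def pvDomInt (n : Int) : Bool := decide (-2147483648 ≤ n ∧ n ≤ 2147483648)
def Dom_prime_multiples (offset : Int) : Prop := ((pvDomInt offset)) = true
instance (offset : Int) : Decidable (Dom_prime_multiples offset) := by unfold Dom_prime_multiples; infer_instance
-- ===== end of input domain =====

-- B replaces A's list-building loop with a closed-form divmod (objective: simpler).

-- ===== PORT A =====
-- inner body of A's 'for prime in primes' loop: base = multiple[idx]; multiple.append(base*prime)
def pmInner (idx : Int) (multiple : List Int) (prime : Int) : List Int :=
  multiple ++ [PySem.List.pyGetD multiple idx 0 * prime]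

def prime_multiples (offset : Int) : Int :=
  let primes : List Int := [3, 5, 7]
  let multiple : List Int :=
    (PySem.List.pyRange 0 offset 3).foldl
      (fun multiple idx => primes.foldl (pmInner idx) multiple) [1]
  PySem.List.pyGetD multiple (offset - 1) 0

-- ===== PORT B =====
def prime_multiples_alt (offset : Int) : Int :=
  if offset ≤ 1 then 1
  else
    let k := PySem.Int.floordiv (offset - 2) 3
    let j := PySem.Int.mod (offset - 2) 3
    7 ^ k.toNat * PySem.List.pyGetD [3, 5, 7] j 0

-- ===== PRECONDITION & SPEC =====
-- Pre_ excludes offset < 0, where A raises IndexError (multiple[offset-1] on the one-element list [1]).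
def Pre_prime_multiples (offset : Int) : Prop := 0 ≤ offset
instance (offset : Int) : Decidable (Pre_prime_multiples offset) := by unfold Pre_prime_multiples; infer_instance
def pvWitness_prime_multiples : Int := 5

def Spec_prime_multiples (offset : Int) (out : Int) : Prop := out = prime_multiples_alt offset
instance (offset : Int) (out : Int) : Decidable (Spec_prime_multiples offset out) := by unfold Spec_prime_multiples; infer_instance

-- ===== CLAIM (what is proved, stated in full; the proofs are below) =====
def Claim_equal_prime_multiples : Prop := ∀ (offset : Int), Dom_prime_multiples offset → Pre_prime_multiples offset → Spec_prime_multiples offset (prime_multiples offset)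


-- ===== LEMMAS AND PROOFS =====

-- closed description of A's 'multiple' list after m outer iterations
def Mlist : Nat → List Int
  | 0 => [1]
  | m + 1 => Mlist m ++ [7 ^ m * 3, 7 ^ m * 5, 7 ^ m * 7]

theorem Mlist_length (m : Nat) : (Mlist m).length = 1 + 3 * m := by
  induction m with
  | zero => rfl
  | succ m ih => simp [Mlist, ih]; omega

theorem getD_append_left (xs ys : List Int) (n : Nat) (d : Int) (h : n < xs.length) :
    (xs ++ ys).getD n d = xs.getD n d := by
  simp [List.getD, List.getElem?_append_left h]

theorem getD_append_right (xs ys : List Int) (n : Nat) (d : Int) (h : xs.length ≤ n) :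
    (xs ++ ys).getD n d = ys.getD (n - xs.length) d := by
  simp [List.getD, List.getElem?_append_right h]

theorem Mlist_getD (m i : Nat) (h : i < 1 + 3 * m) :
    (Mlist m).getD i 0 =
      if i = 0 then 1 else 7 ^ ((i - 1) / 3) * (([3, 5, 7] : List Int).getD ((i - 1) % 3) 0) := by
  induction m with
  | zero =>
    have h0 : i = 0 := by omega
    subst h0; rfl
  | succ m ih =>
    by_cases hc : i < 1 + 3 * m
    · rw [Mlist, getD_append_left _ _ _ _ (by rw [Mlist_length]; omega)]
      exact ih hc
    · rw [Mlist, getD_append_right _ _ _ _ (by rw [Mlist_length]; omega), Mlist_length]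
      have hi : i = 3 * m + 1 ∨ i = 3 * m + 2 ∨ i = 3 * m + 3 := by omega
      rcases hi with h1 | h1 | h1 <;> subst h1
      · rw [show 3 * m + 1 - (1 + 3 * m) = 0 from by omega,
          if_neg (show ¬ 3 * m + 1 = 0 from by omega),
          show (3 * m + 1 - 1) / 3 = m from by omega,
          show (3 * m + 1 - 1) % 3 = 0 from by omega]
        rfl
      · rw [show 3 * m + 2 - (1 + 3 * m) = 1 from by omega,
          if_neg (show ¬ 3 * m + 2 = 0 from by omega),
          show (3 * m + 2 - 1) / 3 = m from by omega,
          show (3 * m + 2 - 1) % 3 = 1 from by omega]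
        rfl
      · rw [show 3 * m + 3 - (1 + 3 * m) = 2 from by omega,
          if_neg (show ¬ 3 * m + 3 = 0 from by omega),
          show (3 * m + 3 - 1) / 3 = m from by omega,
          show (3 * m + 3 - 1) % 3 = 2 from by omega]
        rfl

theorem Mlist_base (m : Nat) : PySem.List.pyGetD (Mlist m) (3 * (m : Int)) 0 = 7 ^ m := by
  have hc : (3 * (m : Int)) = ((3 * m : Nat) : Int) := by omega
  rw [hc, PySem.List.pyGetD_natCast, Mlist_getD m (3 * m) (by omega)]
  rcases m with _ | m'
  · rfl
  · rw [if_neg (show ¬ 3 * (m' + 1) = 0 from by omega),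
      show (3 * (m' + 1) - 1) / 3 = m' from by omega,
      show (3 * (m' + 1) - 1) % 3 = 2 from by omega]
    rw [show (([3, 5, 7] : List Int).getD 2 0) = 7 from rfl, pow_succ]

theorem pyGetD_append_left' (xs ys : List Int) (i : Int) (d : Int) (h0 : 0 ≤ i)
    (h1 : i < (xs.length : Int)) :
    PySem.List.pyGetD (xs ++ ys) i d = PySem.List.pyGetD xs i d := by
  rw [PySem.List.pyGetD_eq_getElem _ _ h0 (by rw [List.length_append]; omega),
    PySem.List.pyGetD_eq_getElem _ _ h0 h1]
  exact List.getElem_append_left (by omega)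

theorem step_M (m : Nat) :
    ([3, 5, 7] : List Int).foldl (pmInner (3 * (m : Int))) (Mlist m) = Mlist (m + 1) := by
  have hlen : ((Mlist m).length : Int) = 1 + 3 * (m : Int) := by
    rw [Mlist_length]; omega
  have hg1 : PySem.List.pyGetD (Mlist m ++ [7 ^ m * 3]) (3 * (m : Int)) 0 = 7 ^ m := by
    rw [pyGetD_append_left' _ _ _ _ (by omega) (by omega : 3 * (m : Int) < ((Mlist m).length : Int))]
    exact Mlist_base m
  have hg2 : PySem.List.pyGetD (Mlist m ++ [7 ^ m * 3] ++ [7 ^ m * 5]) (3 * (m : Int)) 0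
      = 7 ^ m := by
    rw [pyGetD_append_left' _ _ _ _ (by omega)
      (by rw [List.length_append, Mlist_length,
        show ([7 ^ m * 3] : List Int).length = 1 from rfl]; omega)]
    exact hg1
  simp only [List.foldl, pmInner, Mlist_base m, hg1, hg2]
  rw [Mlist]
  simp [List.append_assoc]

theorem loop_M (n : Nat) :
    ((List.range n).map (fun (k : Nat) => (0 : Int) + 3 * (k : Int))).foldl
      (fun multiple idx => ([3, 5, 7] : List Int).foldl (pmInner idx) multiple) [1] = Mlist n := by
  induction n with
  | zero => rfl
  | succ n ih =>
    rw [List.range_succ, List.map_append, List.foldl_append, ih]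
    simp only [List.map]
    rw [show (0 : Int) + 3 * (n : Int) = 3 * (n : Int) from by omega]
    exact step_M n

-- ===== VERDICT (by name: the statement is the Claim_ definition above) =====
theorem prime_multiples_spec : Claim_equal_prime_multiples := by
  intro o _ hpre
  unfold Pre_prime_multiples at hpre
  have h01 : o = 0 ∨ o = 1 ∨ 2 ≤ o := by omega
  rcases h01 with rfl | rfl | h2
  · decide
  · decide
  · unfold Spec_prime_multiples prime_multiples prime_multiples_alt
    rw [PySem.List.pyRange_of_pos 0 o (by decide)]
    dsimp only
    rw [loop_M, if_neg (show ¬ o ≤ 1 by omega),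
      if_pos (show (0 : Int) < o by omega),
      show ((o - 0 + 3 - 1) / 3).toNat = ((o + 2) / 3).toNat from by omega,
      show o - 1 = (((o - 1).toNat : Nat) : Int) from by omega,
      PySem.List.pyGetD_natCast,
      Mlist_getD ((o + 2) / 3).toNat (o - 1).toNat (by omega),
      if_neg (show ¬ (o - 1).toNat = 0 from by omega)]
    simp only [PySem.Int.floordiv, PySem.Int.mod]
    rw [show (o - 2).fdiv 3 = (o - 2) / 3 from by rw [Int.fdiv_eq_ediv]; simp,
      show (o - 2).fmod 3 = (o - 2) % 3 from by rw [Int.fmod_eq_emod]; simp,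
      show (o - 2) % 3 = ((((o - 2) % 3).toNat : Nat) : Int) from by omega,
      PySem.List.pyGetD_natCast,
      show (((o - 2) / 3)).toNat = ((o - 1).toNat - 1) / 3 from by omega,
      show (((o - 2) % 3)).toNat = ((o - 1).toNat - 1) % 3 from by omega]
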